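-- pv_equiv track=rewrite | github.com/khajash/dl-networks | dlnets/models/vision/unet.py | _get_crop_sizes
-- ===== SOURCE A (Python) =====
-- def _get_crop_sizes(img_size, net_depth):
--
--     size = img_size
--     crop_sizes = []
--
--     # downsample
--     for i in range(net_depth):
--         size -= 4
--         size //= 2
--
--     # account for extra ds
--     size *= 2
--
--     # upsample
--     for i in range(net_depth - 1):
--         size *= 2
--         crop_sizes.append(size)
--         size -= 4
--
--     return crop_sizes
-- ===== SOURCE B (Python) =====
-- def _get_crop_sizes(img_size, net_depth):
--     # Downsample recurrence by a countdown helper (inherently sequential).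
--     def down(s, n):
--         while n > 0:
--             s = (s - 4) // 2
--             n -= 1
--         return s
--     a = 2 * down(img_size, net_depth)
--     # Upsample phase in closed form: s_{k+1} = 2*s_k - 8 with s_0 = a gives
--     # crop_sizes[k] = 2**(k+1) * (a - 4) + 8.
--     return [2 ** (k + 1) * (a - 4) + 8 for k in range(net_depth - 1)]
-- ===== Notes on version B (the rewrite author's own statement) =====
-- stated objective: alternative
-- what changed: Both mutating loops are gone: the downsample loop becomes a countdown while-helper, and the accumulating upsample loop (multiply, append, subtract) is replaced by a closed-form comprehension 2**(k+1)*(a-4)+8 over range(net_depth-1).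
import Mathlib
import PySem

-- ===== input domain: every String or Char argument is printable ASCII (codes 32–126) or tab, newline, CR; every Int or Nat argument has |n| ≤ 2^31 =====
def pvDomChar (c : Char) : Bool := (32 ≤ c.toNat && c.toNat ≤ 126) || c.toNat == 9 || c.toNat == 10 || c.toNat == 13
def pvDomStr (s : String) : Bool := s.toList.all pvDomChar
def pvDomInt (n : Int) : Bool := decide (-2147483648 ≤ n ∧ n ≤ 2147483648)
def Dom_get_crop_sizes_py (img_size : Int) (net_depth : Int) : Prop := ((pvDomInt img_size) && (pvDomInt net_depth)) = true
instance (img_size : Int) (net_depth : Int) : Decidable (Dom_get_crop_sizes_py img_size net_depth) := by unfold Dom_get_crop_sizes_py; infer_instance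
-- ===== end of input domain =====

-- B: countdown downsample helper + closed-form comprehension for the upsample list (objective: alternative).

-- ===== PORT A =====
def get_crop_sizes_py (img_size : Int) (net_depth : Int) : List Int :=
  -- size = img_size; downsample loop: size -= 4; size //= 2
  let size : Int :=
    (PySem.List.pyRange 0 net_depth 1).foldl
      (fun s _ => PySem.Int.floordiv (s - 4) 2) img_size
  -- size *= 2
  let size := size * 2
  -- upsample loop: size *= 2; crop_sizes.append(size); size -= 4
  let st :=
    (PySem.List.pyRange 0 (net_depth - 1) 1).foldl
      (fun (st : Int × List Int) _ => (st.1 * 2 - 4, st.2 ++ [st.1 * 2]))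
      (size, [])
  st.2

-- ===== PORT B =====
-- down(s, n): countdown downsample helper from Source B (while n > 0), as structural recursion on n
def pvDown : Int → Nat → Int
  | s, 0 => s
  | s, n + 1 => pvDown (PySem.Int.floordiv (s - 4) 2) n

def get_crop_sizes_py_alt (img_size : Int) (net_depth : Int) : List Int :=
  let a : Int := 2 * pvDown img_size net_depth.toNat
  (List.range (net_depth - 1).toNat).map (fun k => 2 ^ (k + 1) * (a - 4) + 8)

-- ===== PRECONDITION & SPEC =====
def Spec_get_crop_sizes_py (img_size : Int) (net_depth : Int) (out : List Int) : Prop := out = get_crop_sizes_py_alt img_size net_depth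
instance (img_size : Int) (net_depth : Int) (out : List Int) : Decidable (Spec_get_crop_sizes_py img_size net_depth out) := by unfold Spec_get_crop_sizes_py; infer_instance

-- ===== CLAIM (what is proved, stated in full; the proofs are below) =====
def Claim_equal_get_crop_sizes_py : Prop := ∀ (img_size : Int) (net_depth : Int), Dom_get_crop_sizes_py img_size net_depth → Spec_get_crop_sizes_py img_size net_depth (get_crop_sizes_py img_size net_depth)

-- ===== LEMMAS AND PROOFS =====

-- The downsample foldl only uses the length of the list it folds over.
lemma down_eq_foldl {α : Type} : ∀ (l : List α) (s : Int),
    l.foldl (fun s _ => PySem.Int.floordiv (s - 4) 2) s = pvDown s l.length := by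
  intro l
  induction l with
  | nil => intro s; simp [pvDown]
  | cons x xs ih =>
      intro s
      simp only [List.foldl_cons, List.length_cons, pvDown]
      exact ih _

-- Invariant of A's upsample loop over List.range m, for any start value a.
lemma up_loop_invariant (m : Nat) (a : Int) :
    (List.range m).foldl
      (fun (st : Int × List Int) _ => (st.1 * 2 - 4, st.2 ++ [st.1 * 2]))
      (a, []) =
    (2 ^ m * (a - 4) + 4,
      (List.range m).map (fun k => 2 ^ (k + 1) * (a - 4) + 8)) := by
  induction m with
  | zero => simp
  | succ n ih =>
      rw [List.range_succ, List.foldl_append, ih, List.map_append]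
      simp only [List.foldl_cons, List.foldl_nil, List.map_cons, List.map_nil]
      have h1 : (2 ^ n * (a - 4) + 4) * 2 - 4 = 2 ^ (n + 1) * (a - 4) + 4 := by ring
      have h2 : (2 ^ n * (a - 4) + 4) * 2 = 2 ^ (n + 1) * (a - 4) + 8 := by ring
      rw [h1, h2]

-- ===== VERDICT (by name: the statement is the Claim_ definition above) =====
theorem get_crop_sizes_py_spec : Claim_equal_get_crop_sizes_py := by
  intro img_size net_depth _
  unfold Spec_get_crop_sizes_py get_crop_sizes_py get_crop_sizes_py_alt
  simp only [PySem.List.pyRange_one]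
  rw [down_eq_foldl]
  simp only [List.length_map, List.length_range]
  have hlen : (net_depth - 0).toNat = net_depth.toNat := by omega
  rw [hlen]
  set a : Int := pvDown img_size net_depth.toNat * 2 with ha
  have ha2 : (2 : Int) * pvDown img_size net_depth.toNat = a := by rw [ha]; ring
  rw [ha2, List.foldl_map, up_loop_invariant]
  have h3 : (net_depth - 1 - 0).toNat = (net_depth - 1).toNat := by omega
  rw [h3]
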